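-- pv_equiv track=rewrite | github.com/summer-0401/Coding_Test | Programmers/Level 1/모의고사.py | solution
-- ===== SOURCE A (Python) =====
-- def solution(answers):
--     answer =[]
--     first = [1,2,3,4,5]
--     second = [2,1,2,3,2,4,2,5]
--     third = [3,3,1,1,2,2,4,4,5,5]
--
--     result = {i:0 for i in range(1,4)}
--
--     i = j = k = 0
--     for ans in answers:
--         if first[i%5] == ans:
--             result[1]+=1
--         if second[j%8] == ans:
--             result[2]+=1
--         if third[k%10] == ans:
--             result[3]+=1
--         i+=1
--         j+=1
--         k+=1
--
--     win = max(result.values())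
--     for r in result.keys():
--         if result[r]==win:
--             answer.append(r)
--     return answer
-- ===== SOURCE B (Python) =====
-- def solution(answers):
--     # All three pattern lengths (5, 8, 10) divide 40, so a guess at position idx
--     # depends only on idx % 40.  Build one histogram of (idx % 40, answer) pairs
--     # in a single pass, then read each pattern's score off the 40-bucket table
--     # without rescanning the answers.
--     patterns = [[1, 2, 3, 4, 5],
--                 [2, 1, 2, 3, 2, 4, 2, 5],
--                 [3, 3, 1, 1, 2, 2, 4, 4, 5, 5]]
--     hist = {}
--     for idx, a in enumerate(answers):
--         key = (idx % 40, a)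
--         hist[key] = hist.get(key, 0) + 1
--     scores = [sum(hist.get((r, pat[r % len(pat)]), 0) for r in range(40))
--               for pat in patterns]
--     best = max(scores)
--     return [i + 1 for i, s in enumerate(scores) if s == best]
-- ===== Notes on version B (the rewrite author's own statement) =====
-- stated objective: alternative
-- what changed: Instead of checking each answer against the three patterns, B exploits that all pattern lengths divide 40: one pass builds a histogram keyed by (index mod 40, answer), and each score is then read off the 40-bucket table without rescanning the answers.
import Mathlib
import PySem

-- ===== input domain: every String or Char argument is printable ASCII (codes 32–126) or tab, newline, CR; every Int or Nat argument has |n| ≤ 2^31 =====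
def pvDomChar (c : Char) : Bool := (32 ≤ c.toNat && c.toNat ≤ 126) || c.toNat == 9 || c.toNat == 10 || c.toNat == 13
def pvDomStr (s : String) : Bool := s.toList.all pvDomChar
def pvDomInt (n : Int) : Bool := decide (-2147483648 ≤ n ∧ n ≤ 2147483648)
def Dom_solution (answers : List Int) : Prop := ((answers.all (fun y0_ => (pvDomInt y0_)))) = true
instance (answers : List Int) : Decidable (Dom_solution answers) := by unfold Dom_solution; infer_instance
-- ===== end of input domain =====

-- B replaces A's fused per-answer check against the three patterns by a different
-- algorithm: since all pattern lengths divide 40, one pass builds a histogram keyed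
-- by (index mod 40, answer) and each score is read off the 40-bucket table.

-- ===== PORT A =====
-- the body of A's for-loop (one step of the fused scan)
def pvStepA (st : PySem.Dict Int Int × Int × Int × Int) (ans : Int) : PySem.Dict Int Int × Int × Int × Int :=
  let res := st.1; let i := st.2.1; let j := st.2.2.1; let k := st.2.2.2
  let res := if PySem.List.pyGetD ([1,2,3,4,5] : List Int) (PySem.Int.mod i 5) 0 == ans then res.modify 1 0 (· + 1) else res
  let res := if PySem.List.pyGetD ([2,1,2,3,2,4,2,5] : List Int) (PySem.Int.mod j 8) 0 == ans then res.modify 2 0 (· + 1) else res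
  let res := if PySem.List.pyGetD ([3,3,1,1,2,2,4,4,5,5] : List Int) (PySem.Int.mod k 10) 0 == ans then res.modify 3 0 (· + 1) else res
  (res, i + 1, j + 1, k + 1)

def solution (answers : List Int) : List Int :=
  let result : PySem.Dict Int Int :=
    (PySem.List.pyRange 1 4 1).foldl (fun d i => d.insert i 0) PySem.Dict.empty
  let st := answers.foldl pvStepA (result, 0, 0, 0)
  let res := st.1
  -- max(result.values()): values always has 3 elements, so max? is never none
  let win := (PySem.List.max? res.values (fun x => x)).getD 0
  res.keys.foldl (fun acc r => if res.getD r 0 == win then acc ++ [r] else acc) []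

-- ===== PORT B =====
def solution_alt (answers : List Int) : List Int :=
  let patterns : List (List Int) := [[1,2,3,4,5],[2,1,2,3,2,4,2,5],[3,3,1,1,2,2,4,4,5,5]]
  -- hist[(idx % 40, a)] = hist.get(key, 0) + 1  over enumerate(answers)
  let hist : PySem.Dict (Int × Int) Int :=
    (PySem.List.enumerate answers 0).foldl
      (fun h p => h.modify (PySem.Int.mod p.1 40, p.2) 0 (· + 1)) PySem.Dict.empty
  let scores := patterns.map (fun pat =>
    ((PySem.List.pyRange 0 40 1).map
      (fun r => hist.getD (r, PySem.List.pyGetD pat (PySem.Int.mod r (pat.length : Int)) 0) 0)).sum)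
  let best := (PySem.List.max? scores (fun x => x)).getD 0
  (PySem.List.enumerate scores 0).foldl (fun acc p => if p.2 == best then acc ++ [p.1 + 1] else acc) []

-- ===== PRECONDITION & SPEC =====
def Spec_solution (answers : List Int) (out : List Int) : Prop := out = solution_alt answers
instance (answers : List Int) (out : List Int) : Decidable (Spec_solution answers out) := by unfold Spec_solution; infer_instance

-- ===== CLAIM (what is proved, stated in full; the proofs are below) =====
def Claim_equal_solution : Prop := ∀ (answers : List Int), Dom_solution answers → Spec_solution answers (solution answers)

-- ===== LEMMAS AND PROOFS =====

-- the number of positions where the repeating pattern `pat`, read from offset `i`, matches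
def pvCnt (pat : List Int) (i : Int) : List Int → Int
  | [] => 0
  | a :: rest =>
    (if PySem.List.pyGetD pat (PySem.Int.mod i (pat.length : Int)) 0 == a then 1 else 0)
      + pvCnt pat (i + 1) rest

def pvDict3 (a b c : Int) : PySem.Dict Int Int := PySem.Dict.mk [(1, a), (2, b), (3, c)]

theorem pvModify1 (a b c : Int) (f : Int → Int) :
    (pvDict3 a b c).modify 1 0 f = pvDict3 (f a) b c := by
  simp [pvDict3, PySem.Dict.modify, PySem.Dict.insert]; rfl

theorem pvModify2 (a b c : Int) (f : Int → Int) :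
    (pvDict3 a b c).modify 2 0 f = pvDict3 a (f b) c := by
  simp [pvDict3, PySem.Dict.modify, PySem.Dict.insert]; rfl

theorem pvModify3 (a b c : Int) (f : Int → Int) :
    (pvDict3 a b c).modify 3 0 f = pvDict3 a b (f c) := by
  simp [pvDict3, PySem.Dict.modify, PySem.Dict.insert]; rfl

theorem pvStep (a b c i j k x : Int) :
    pvStepA (pvDict3 a b c, i, j, k) x
    = (pvDict3 (a + if PySem.List.pyGetD ([1,2,3,4,5] : List Int) (PySem.Int.mod i 5) 0 == x then 1 else 0)
               (b + if PySem.List.pyGetD ([2,1,2,3,2,4,2,5] : List Int) (PySem.Int.mod j 8) 0 == x then 1 else 0)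
               (c + if PySem.List.pyGetD ([3,3,1,1,2,2,4,4,5,5] : List Int) (PySem.Int.mod k 10) 0 == x then 1 else 0),
       i + 1, j + 1, k + 1) := by
  simp only [pvStepA]
  split_ifs <;> simp [pvModify1, pvModify2, pvModify3]

theorem pvFoldA (answers : List Int) : ∀ (a b c i j k : Int),
    answers.foldl pvStepA (pvDict3 a b c, i, j, k)
    = (pvDict3 (a + pvCnt [1,2,3,4,5] i answers)
               (b + pvCnt [2,1,2,3,2,4,2,5] j answers)
               (c + pvCnt [3,3,1,1,2,2,4,4,5,5] k answers),
       i + answers.length, j + answers.length, k + answers.length) := by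
  induction answers with
  | nil => intro a b c i j k; simp [pvCnt]
  | cons x rest ih =>
    intro a b c i j k
    rw [List.foldl_cons, pvStep, ih]
    simp only [pvCnt, pvDict3, Prod.mk.injEq, PySem.Dict.mk.injEq, List.cons.injEq,
      List.length_cons, Prod.mk.injEq, and_true, true_and]
    norm_num
    refine ⟨⟨?_, ?_, ?_⟩, ?_, ?_, ?_⟩ <;> ring

-- ---- B side ----

-- one-hot: among the 40 residues exactly one (namely q) can match the key (q, v)
set_option maxRecDepth 8192 in
theorem pvOneHot (f : Int → Int) (q v : Int) (h0 : 0 ≤ q) (h1 : q < 40) :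
    ((PySem.List.pyRange 0 40 1).map
      (fun r => if ((q, v) : Int × Int) == (r, f r) then (1 : Int) else 0)).sum
    = if v == f q then 1 else 0 := by
  have hL : PySem.List.pyRange 0 40 1
      = [0,1,2,3,4,5,6,7,8,9,10,11,12,13,14,15,16,17,18,19,20,21,22,23,24,25,26,27,28,29,
         30,31,32,33,34,35,36,37,38,39] := by decide
  rw [hL]
  interval_cases q <;> simp [beq_iff_eq, Prod.mk.injEq]

-- counting with the fused index modulo 40 instead of pattern-length periods
def pvCnt40 (f : Int → Int) (i : Int) : List Int → Int
  | [] => 0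
  | a :: rest => (if a == f (PySem.Int.mod i 40) then 1 else 0) + pvCnt40 f (i + 1) rest

-- summing the histogram buckets of a key list reproduces the periodic match count
theorem pvSumCount (f : Int → Int) (answers : List Int) : ∀ (i : Int),
    ((PySem.List.pyRange 0 40 1).map
      (fun r => ((((PySem.List.enumerate answers i).map
          (fun p => (PySem.Int.mod p.1 40, p.2))).count (r, f r) : Nat) : Int))).sum
    = pvCnt40 f i answers := by
  induction answers with
  | nil => intro i; simp [PySem.List.enumerate_nil, pvCnt40]
  | cons x rest ih =>
    intro i
    rw [PySem.List.enumerate_cons]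
    simp only [List.map_cons, List.count_cons, pvCnt40]
    push_cast
    rw [PySem.List.sum_map_add_int, ih]
    rw [pvOneHot f (PySem.Int.mod i 40) x (PySem.Int.mod_nonneg i (by norm_num))
        (PySem.Int.mod_lt i (by norm_num))]
    exact add_comm _ _

theorem pvModMod (i len : Int) (hpos : 0 < len) (hdvd : len ∣ 40) :
    PySem.Int.mod (PySem.Int.mod i 40) len = PySem.Int.mod i len := by
  simp only [PySem.Int.mod_eq_emod_of_pos hpos,
    PySem.Int.mod_eq_emod_of_pos (show (0:Int) < 40 by norm_num)]
  exact Int.emod_emod_of_dvd i hdvd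

theorem pvBeqComm (a b : Int) : (a == b) = (b == a) := by
  by_cases h : a = b
  · subst h; rfl
  · rw [beq_eq_false_iff_ne.mpr h, beq_eq_false_iff_ne.mpr (Ne.symm h)]

-- when the pattern length divides 40, reading the pattern at (i % 40) is reading it at i
theorem pvCnt40_eq (pat : List Int) (hpos : 0 < (pat.length : Int)) (hdvd : (pat.length : Int) ∣ 40)
    (answers : List Int) : ∀ (i : Int),
    pvCnt40 (fun r => PySem.List.pyGetD pat (PySem.Int.mod r (pat.length : Int)) 0) i answers
    = pvCnt pat i answers := by
  induction answers with
  | nil => intro i; simp [pvCnt40, pvCnt]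
  | cons x rest ih =>
    intro i
    simp only [pvCnt40, pvCnt, pvModMod i _ hpos hdvd, ih]
    rw [pvBeqComm]

-- the B-side score of one pattern, as written in the port, equals the periodic match count
theorem pvScoreEq (pat : List Int) (hpos : 0 < (pat.length : Int)) (hdvd : (pat.length : Int) ∣ 40)
    (answers : List Int) :
    ((PySem.List.pyRange 0 40 1).map
      (fun r => ((PySem.List.enumerate answers 0).foldl
          (fun (h : PySem.Dict (Int × Int) Int) p => h.modify (PySem.Int.mod p.1 40, p.2) 0 (· + 1))
          PySem.Dict.empty).getD (r, PySem.List.pyGetD pat (PySem.Int.mod r (pat.length : Int)) 0) 0)).sum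
    = pvCnt pat 0 answers := by
  have hhist : (PySem.List.enumerate answers 0).foldl
      (fun (h : PySem.Dict (Int × Int) Int) p => h.modify (PySem.Int.mod p.1 40, p.2) 0 (· + 1)) PySem.Dict.empty
      = ((PySem.List.enumerate answers 0).map (fun p => (PySem.Int.mod p.1 40, p.2))).foldl
          (fun (h : PySem.Dict (Int × Int) Int) k => h.modify k 0 (· + 1)) PySem.Dict.empty := by
    rw [List.foldl_map]
  rw [hhist]
  simp only [PySem.Dict.getD_foldl_modify_add_one, PySem.Dict.getD_empty, zero_add]
  rw [pvSumCount, pvCnt40_eq pat hpos hdvd answers 0]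

-- ===== VERDICT (by name: the statement is the Claim_ definition above) =====
theorem solution_spec : Claim_equal_solution := by
  intro answers _
  unfold Spec_solution solution solution_alt
  simp only []
  have hinit : (PySem.List.pyRange 1 4 1).foldl (fun (d : PySem.Dict Int Int) i => d.insert i 0) PySem.Dict.empty
      = pvDict3 0 0 0 := by decide
  rw [hinit, pvFoldA]
  simp only [List.map_cons, List.map_nil]
  simp only [pvScoreEq [1,2,3,4,5] (by norm_num) (by norm_num),
      pvScoreEq [2,1,2,3,2,4,2,5] (by norm_num) (by norm_num),
      pvScoreEq [3,3,1,1,2,2,4,4,5,5] (by norm_num) (by norm_num)]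
  simp only [PySem.Dict.values, PySem.Dict.keys, PySem.Dict.getD, PySem.Dict.get?, Option.getD, pvDict3,
    List.map_cons, List.map,
    PySem.List.enumerate_cons, PySem.List.enumerate_nil]
  norm_num
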